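-- pv_equiv track=rewrite | github.com/dj-lumiere/problem-solving-boj | 백준/Gold/23048. 자연수 색칠하기/자연수 색칠하기.py | color_number
-- ===== SOURCE A (Python) =====
-- def color_number(limit: int) -> tuple[int, list[int]]:
--     prime_color = [0, 1] + [0 for _ in range(2, limit + 1)]
--     color_count = 1
--     for i in range(2, limit + 1):
--         if prime_color[i]:
--             continue
--         color_count += 1
--         prime_color[i : limit + 1 : i] = [color_count] * (limit // i)
--     return color_count, prime_color
-- ===== SOURCE B (Python) =====
-- def color_number(limit: int) -> tuple[int, list[int]]:
--     colors = [0, 1] + [0] * max(limit - 1, 0)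
--     count = 1
--     for n in range(2, limit + 1):
--         # smallest prime factor of n by trial division up to sqrt(n)
--         d = 2
--         while d * d <= n and n % d != 0:
--             d += 1
--         if d * d > n:
--             d = n
--         if d == n:  # n is prime: open a new color
--             count += 1
--             colors[n] = count
--         else:  # largest prime factor of n = that of n // d, already colored
--             colors[n] = colors[n // d]
--     return count, colors
-- ===== Notes on version B (the rewrite author's own statement) =====
-- stated objective: alternative
-- what changed: Replaces A's overwrite-sieve (each prime sweeps a stepped slice over all its multiples, later primes overwriting earlier colors) by a single left-to-right pass that colors each n independently: find its smallest prime factor by trial division and reuse the already-computed color of n//d, whose largest prime factor equals n's.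
import Mathlib
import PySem

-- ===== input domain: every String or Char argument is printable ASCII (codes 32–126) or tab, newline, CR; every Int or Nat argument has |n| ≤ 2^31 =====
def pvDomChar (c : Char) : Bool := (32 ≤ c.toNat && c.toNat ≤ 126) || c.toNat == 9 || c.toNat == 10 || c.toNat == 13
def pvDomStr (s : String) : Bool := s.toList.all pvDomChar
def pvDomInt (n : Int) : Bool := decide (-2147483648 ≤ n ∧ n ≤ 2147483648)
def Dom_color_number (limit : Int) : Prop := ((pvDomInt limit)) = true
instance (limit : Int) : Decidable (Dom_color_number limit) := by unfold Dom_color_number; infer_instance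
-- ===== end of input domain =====

-- B replaces A's overwrite-sieve (each prime sweeps its stepped slice of multiples) by a
-- single left-to-right pass that colors each n from its smallest prime factor and the
-- already-computed color of n // d (objective: alternative algorithm, not faster).

-- ===== PORT A =====
-- loop body of A's `for i in range(2, limit+1)`; state = (color_count, prime_color).
-- `if prime_color[i]:` reads an always in-range index (2 ≤ i ≤ limit < len), ported as pyGetD _ _ 0 ≠ 0.
-- The extended-slice write `prime_color[i:limit+1:i] = [color_count]*(limit//i)` is ported by hand:
-- on this list of length limit+1 it overwrites exactly the indices j with i ≤ j ≤ limit and i ∣ j,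
-- and the RHS length limit//i equals the slice length, so it is the mapIdx below (exact).
def stepA (st : Int × List Int) (i : Int) : Int × List Int :=
  if PySem.List.pyGetD st.2 i 0 ≠ 0 then st
  else
    let cc := st.1 + 1
    (cc, st.2.mapIdx (fun j v => if i ≤ (j : Int) ∧ PySem.Int.mod (j : Int) i = 0 then cc else v))

def color_number (limit : Int) : Int × List Int :=
  let init : List Int := [0, 1] ++ (PySem.List.pyRange 2 (limit + 1) 1).map (fun _ => (0 : Int))
  (PySem.List.pyRange 2 (limit + 1) 1).foldl stepA (1, init)

-- ===== PORT B =====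
-- `while d * d <= n and n % d != 0: d += 1`; the extra `2 ≤ d` only makes the recursion total
-- (B always starts it at d = 2, where it is redundant).
def sdLoop (n d : Int) : Int :=
  if h : 2 ≤ d ∧ d * d ≤ n ∧ PySem.Int.mod n d ≠ 0 then sdLoop n (d + 1) else d
termination_by (n - d).toNat
decreasing_by
  obtain ⟨h2, hdd, -⟩ := h
  have : 2 * d ≤ d * d := by nlinarith
  omega

-- `d = 2; while ...; if d * d > n: d = n`  — the final value of d
def spfB (n : Int) : Int :=
  let d0 := sdLoop n 2
  if d0 * d0 > n then n else d0

-- loop body of B's `for n in range(2, limit+1)`; state = (count, colors).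
def stepB (st : Int × List Int) (n : Int) : Int × List Int :=
  let d := spfB n
  if d = n then
    (st.1 + 1, PySem.List.pySetD st.2 n (st.1 + 1))
  else
    (st.1, PySem.List.pySetD st.2 n (PySem.List.pyGetD st.2 (PySem.Int.floordiv n d) 0))

def color_number_alt (limit : Int) : Int × List Int :=
  let init : List Int := [0, 1] ++ List.replicate (max (limit - 1) 0).toNat (0 : Int)
  (PySem.List.pyRange 2 (limit + 1) 1).foldl stepB (1, init)

-- ===== PRECONDITION & SPEC =====
def Spec_color_number (limit : Int) (out : Int × List Int) : Prop := out = color_number_alt limit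
instance (limit : Int) (out : Int × List Int) : Decidable (Spec_color_number limit out) := by unfold Spec_color_number; infer_instance

-- ===== CLAIM (what is proved, stated in full; the proofs are below) =====
def Claim_equal_color_number : Prop := ∀ (limit : Int), Dom_color_number limit → Spec_color_number limit (color_number limit)

-- ===== LEMMAS AND PROOFS =====

-- number of primes ≤ k
def npr (k : Nat) : Nat := (List.range (k + 1)).countP (fun p => decide (Nat.Prime p))

-- largest prime factor (0 for n < 2)
def lpf (n : Nat) : Nat :=
  if n < 2 then 0
  else if Nat.Prime n then n
  else lpf (n / n.minFac)
termination_by n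
decreasing_by
  rename_i h hp
  exact Nat.div_lt_self (by omega) (Nat.minFac_prime (by omega)).one_lt

-- cell value of A's sieve at n (n ≥ 2) after the loop has processed i = 2 .. k:
-- the last prime ≤ k dividing n wins.
def pcol : Nat → Nat → Int
  | 0, _ => 0
  | k + 1, n => if Nat.Prime (k + 1) ∧ (k + 1) ∣ n then 1 + (npr (k + 1) : Int) else pcol k n

-- the common closed form both ports are proved equal to
def specOut (limit : Int) : Int × List Int :=
  (1 + (npr limit.toNat : Int),
   [0, 1] ++ (List.range' 2 (limit.toNat - 1)).map (fun n => 1 + (npr (lpf n) : Int)))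

-- A's intermediate sieve list after processing i = 2 .. k
def midA (L k : Nat) : List Int := [0, 1] ++ (List.range' 2 (L - 1)).map (fun n => pcol k n)

-- B's intermediate list after processing n = 2 .. k
def midB (L k : Nat) : List Int :=
  [0, 1] ++ (List.range' 2 (L - 1)).map (fun n => if n ≤ k then 1 + (npr (lpf n) : Int) else 0)

-- ---- arithmetic facts ----

theorem npr_succ (k : Nat) :
    npr (k + 1) = npr k + (if Nat.Prime (k + 1) then 1 else 0) := by
  simp [npr, List.range_succ, List.countP_append, List.countP_singleton]
  split_ifs <;> simp_all

theorem npr_one : npr 1 = 0 := by decide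

theorem lpf_eq_self (n : Nat) (h : n.Prime) : lpf n = n := by
  rw [lpf]; simp [h, show ¬ n < 2 from by have := h.two_le; omega]

theorem lpf_comp (n : Nat) (h2 : 2 ≤ n) (h : ¬ n.Prime) : lpf n = lpf (n / n.minFac) := by
  rw [lpf]; simp [h, show ¬ n < 2 from by omega]

theorem minFac_div_lbound (n : Nat) (h2 : 2 ≤ n) (h : ¬ n.Prime) : 2 ≤ n / n.minFac := by
  have hp := Nat.minFac_prime (show n ≠ 1 by omega)
  have hdvd := Nat.minFac_dvd n
  rcases Nat.lt_or_ge (n / n.minFac) 2 with hlt | hge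
  · interval_cases h1 : (n / n.minFac)
    · have := Nat.div_eq_zero_iff.mp h1
      have := hp.pos
      have := Nat.le_of_dvd (by omega) hdvd
      omega
    · have : n = n.minFac := by
        have := Nat.div_mul_cancel hdvd
        rw [h1, one_mul] at this
        omega
      exact absurd (this ▸ hp) h
  · exact hge

theorem lpf_prime (n : Nat) (h2 : 2 ≤ n) : (lpf n).Prime := by
  induction n using Nat.strong_induction_on with
  | _ n ih =>
    by_cases hp : n.Prime
    · rw [lpf_eq_self n hp]; exact hp
    · rw [lpf_comp n h2 hp]
      have hlt : n / n.minFac < n :=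
        Nat.div_lt_self (by omega) (Nat.minFac_prime (by omega)).one_lt
      exact ih _ hlt (minFac_div_lbound n h2 hp)

theorem lpf_dvd (n : Nat) (h2 : 2 ≤ n) : lpf n ∣ n := by
  induction n using Nat.strong_induction_on with
  | _ n ih =>
    by_cases hp : n.Prime
    · rw [lpf_eq_self n hp]
    · rw [lpf_comp n h2 hp]
      have hlt : n / n.minFac < n :=
        Nat.div_lt_self (by omega) (Nat.minFac_prime (by omega)).one_lt
      exact (ih _ hlt (minFac_div_lbound n h2 hp)).trans (Nat.div_dvd_of_dvd (Nat.minFac_dvd n))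

theorem lpf_le (n : Nat) (h2 : 2 ≤ n) : lpf n ≤ n :=
  Nat.le_of_dvd (by omega) (lpf_dvd n h2)

theorem lpf_max (n p : Nat) (h2 : 2 ≤ n) (hp : p.Prime) (hdvd : p ∣ n) : p ≤ lpf n := by
  induction n using Nat.strong_induction_on generalizing p with
  | _ n ih =>
    by_cases hpr : n.Prime
    · rw [lpf_eq_self n hpr]
      exact Nat.le_of_dvd (by omega) hdvd
    · rw [lpf_comp n h2 hpr]
      have hmf := Nat.minFac_prime (show n ≠ 1 by omega)
      have hlt : n / n.minFac < n := Nat.div_lt_self (by omega) hmf.one_lt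
      have hge2 := minFac_div_lbound n h2 hpr
      by_cases hepq : p = n.minFac
      · -- lpf (n / minFac) is a prime factor of n, hence ≥ minFac n = p
        have h1 : (lpf (n / n.minFac)).Prime := lpf_prime _ hge2
        have h3 : lpf (n / n.minFac) ∣ n :=
          (lpf_dvd _ hge2).trans (Nat.div_dvd_of_dvd (Nat.minFac_dvd n))
        have := Nat.minFac_le_of_dvd h1.two_le h3
        omega
      · apply ih _ hlt _ hge2 hp
        -- p ∣ n, p ≠ minFac n, both prime ⇒ p ∣ n / minFac n
        have hmul : p ∣ (n / n.minFac) * n.minFac := by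
          rw [Nat.div_mul_cancel (Nat.minFac_dvd n)]; exact hdvd
        rcases (Nat.Prime.dvd_mul hp).mp hmul with h' | h'
        · exact h'
        · exact absurd ((Nat.prime_dvd_prime_iff_eq hp hmf).mp h') hepq

-- pcol is 0 exactly while no prime ≤ k divides n
theorem pcol_eq_zero_iff (k n : Nat) :
    pcol k n = 0 ↔ ∀ p, p ≤ k → p.Prime → ¬ p ∣ n := by
  induction k with
  | zero =>
    constructor
    · intro _ p hp hpr _; have := hpr.two_le; omega
    · intro _; rfl
  | succ k ih =>
    rw [pcol]
    by_cases h : Nat.Prime (k + 1) ∧ (k + 1) ∣ n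
    · simp only [h, if_true]
      constructor
      · intro hz
        have hpos : (0:Int) < 1 + (npr (k+1) : Int) := by positivity
        exact absurd hz hpos.ne'
      · intro hall; exact absurd h.2 (hall (k+1) le_rfl h.1)
    · simp only [h, if_false, ih]
      constructor
      · intro hall p hp hpr hdvd
        rcases Nat.lt_or_ge p (k + 1) with hlt | hge
        · exact hall p (by omega) hpr hdvd
        · have : p = k + 1 := by omega
          subst this; exact h ⟨hpr, hdvd⟩
      · intro hall p hp hpr hdvd; exact hall p (by omega) hpr hdvd

-- once the largest prime factor has been processed, the cell is final
theorem pcol_final (k n : Nat) (h2 : 2 ≤ n) (hk : lpf n ≤ k) :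
    pcol k n = 1 + (npr (lpf n) : Int) := by
  induction k with
  | zero => exact absurd hk (by have := (lpf_prime n h2).two_le; omega)
  | succ k ih =>
    rw [pcol]
    by_cases h : Nat.Prime (k + 1) ∧ (k + 1) ∣ n
    · have hle : k + 1 ≤ lpf n := lpf_max n (k+1) h2 h.1 h.2
      have : lpf n = k + 1 := by omega
      simp [h, this]
    · have hne : lpf n ≠ k + 1 := by
        intro he
        exact h ⟨he ▸ lpf_prime n h2, he ▸ lpf_dvd n h2⟩
      simp only [h, if_false]
      exact ih (by omega)

-- ---- trial-division loop of B computes minFac ----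

theorem sdLoop_correct (n : Nat) (h2 : 2 ≤ n) (d : Nat) (hd : 2 ≤ d)
    (hnone : ∀ e, 2 ≤ e → e < d → ¬ e ∣ n) :
    (fun r => if r * r > (n : Int) then (n : Int) else r) (sdLoop (n : Int) (d : Int)) =
      (n.minFac : Int) := by
  by_cases hdn : d * d ≤ n
  case neg =>
    -- loop stops at once; no divisor e with e*e ≤ n, so n is prime and the answer is n
    rw [sdLoop]
    have hc : ¬ (2 ≤ (d:Int) ∧ (d:Int) * (d:Int) ≤ (n:Int) ∧ PySem.Int.mod (n:Int) (d:Int) ≠ 0) := by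
      intro ⟨_, hdd, _⟩
      exact hdn (by exact_mod_cast hdd)
    rw [dif_neg hc]
    have hprime : n.Prime := by
      rw [Nat.prime_def_le_sqrt]
      refine ⟨h2, fun m hm hms => hnone m hm ?_⟩
      have := Nat.sqrt_lt_self (show 1 < n by omega)
      have hmm : m * m ≤ n := Nat.le_sqrt.mp hms
      nlinarith
    have : (n:Int) < (d:Int) * (d:Int) := by exact_mod_cast Nat.lt_of_not_ge hdn
    simp only [gt_iff_lt, this, if_pos]
    exact_mod_cast hprime.minFac_eq.symm
  case pos =>
    by_cases hmod : n % d = 0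
    · -- found the smallest divisor
      rw [sdLoop]
      have hc : ¬ (2 ≤ (d:Int) ∧ (d:Int) * (d:Int) ≤ (n:Int) ∧ PySem.Int.mod (n:Int) (d:Int) ≠ 0) := by
        intro ⟨_, _, hne⟩
        exact hne (by rw [PySem.Int.mod_natCast]; exact_mod_cast congrArg (Nat.cast (R := Int)) hmod)
      rw [dif_neg hc]
      have hddI : ¬ ((d:Int) * (d:Int) > (n:Int)) := by push_cast; omega
      simp only [gt_iff_lt, hddI, if_neg]
      have hdvd : d ∣ n := Nat.dvd_of_mod_eq_zero hmod
      have h1 : n.minFac ≤ d := Nat.minFac_le_of_dvd hd hdvd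
      have h2' : ¬ n.minFac < d := fun hlt =>
        hnone n.minFac (Nat.minFac_prime (show n ≠ 1 by omega)).two_le hlt (Nat.minFac_dvd n)
      have : n.minFac = d := by omega
      exact_mod_cast congrArg (Nat.cast (R := Int)) this.symm
    · -- keep searching
      rw [sdLoop]
      have hc : (2 ≤ (d:Int) ∧ (d:Int) * (d:Int) ≤ (n:Int) ∧ PySem.Int.mod (n:Int) (d:Int) ≠ 0) := by
        refine ⟨by exact_mod_cast hd, by exact_mod_cast hdn, ?_⟩
        rw [PySem.Int.mod_natCast]
        exact_mod_cast fun he => hmod (by exact_mod_cast he)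
      rw [dif_pos hc]
      have : ((d:Int) + 1) = ((d + 1 : Nat) : Int) := by push_cast; ring
      rw [this]
      apply sdLoop_correct n h2 (d + 1) (by omega)
      intro e he helt
      rcases Nat.lt_or_ge e d with h' | h'
      · exact hnone e he h'
      · have : e = d := by omega
        subst this
        exact fun hdvd => hmod (Nat.dvd_iff_mod_eq_zero.mp hdvd)
termination_by (n - d)
decreasing_by
  have : 2 * d ≤ d * d := by nlinarith
  omega

-- ---- generic lemmas about lists of shape 0 :: 1 :: map f (range' 2 c) ----

theorem midIdx (f : Nat → Int) (c j : Nat) (hj : j < c + 2) :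
    ((0 : Int) :: (1 : Int) :: (List.range' 2 c).map f)[j]'(by simp; omega) =
      if j = 0 then 0 else if j = 1 then 1 else f j := by
  match j with
  | 0 => rfl
  | 1 => rfl
  | j + 2 =>
    simp only [List.getElem_cons_succ, List.getElem_map, List.getElem_range']
    rw [if_neg (by omega), if_neg (by omega)]
    congr 1
    omega

theorem midGet (f : Nat → Int) (c m : Nat) (hm : m < c + 2) :
    PySem.List.pyGetD ((0 : Int) :: (1 : Int) :: (List.range' 2 c).map f) ((m : Nat) : Int) 0 =
      if m = 0 then 0 else if m = 1 then 1 else f m := by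
  rw [PySem.List.pyGetD_natCast]
  rw [List.getD_eq_getElem _ _ (by simp; omega)]
  exact midIdx f c m hm

theorem midSet (f g : Nat → Int) (v : Int) (c m : Nat) (hm2 : 2 ≤ m) (hmc : m < c + 2)
    (hv : g m = v) (hagree : ∀ n, 2 ≤ n → n < c + 2 → n ≠ m → f n = g n) :
    ((0 : Int) :: (1 : Int) :: (List.range' 2 c).map f).set m v =
      (0 : Int) :: (1 : Int) :: (List.range' 2 c).map g := by
  apply List.ext_getElem (by simp)
  intro j hj _
  have hjc : j < c + 2 := by simp at hj; omega
  rw [List.getElem_set]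
  by_cases he : m = j
  · subst he
    rw [midIdx g c m hmc]
    simp [show ¬ m = 0 by omega, show ¬ m = 1 by omega, hv, if_pos]
  · rw [if_neg he, midIdx f c j hjc, midIdx g c j hjc]
    by_cases h0 : j = 0
    · simp [h0]
    by_cases h1 : j = 1
    · simp [h1]
    simp only [h0, h1, if_false]
    exact hagree j (by omega) hjc (by omega)

theorem midMapIdx (F : Nat → Int → Int) (f g : Nat → Int) (c : Nat)
    (h0 : F 0 0 = 0) (h1 : F 1 1 = 1)
    (hagree : ∀ n, 2 ≤ n → n < c + 2 → F n (f n) = g n) :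
    ((0 : Int) :: (1 : Int) :: (List.range' 2 c).map f).mapIdx F =
      (0 : Int) :: (1 : Int) :: (List.range' 2 c).map g := by
  apply List.ext_getElem (by simp)
  intro j hj _
  have hjc : j < c + 2 := by simp [List.length_mapIdx] at hj; omega
  rw [List.getElem_mapIdx, midIdx f c j hjc, midIdx g c j hjc]
  by_cases hj0 : j = 0
  · simp [hj0, h0]
  by_cases hj1 : j = 1
  · simp [hj0, hj1, h1]
  simp only [hj0, hj1, if_false]
  exact hagree j (by omega) hjc

theorem midA_shape (L k : Nat) :
    midA L k = (0 : Int) :: (1 : Int) :: (List.range' 2 (L - 1)).map (fun n => pcol k n) := rfl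

theorem midB_shape (L k : Nat) :
    midB L k = (0 : Int) :: (1 : Int) ::
      (List.range' 2 (L - 1)).map (fun n => if n ≤ k then 1 + (npr (lpf n) : Int) else 0) := rfl

-- the sieve cell at a yet-unprocessed position m = k+2 is 0 iff m is prime
theorem pcol_self_zero (k : Nat) : pcol (k + 1) (k + 2) = 0 ↔ Nat.Prime (k + 2) := by
  rw [pcol_eq_zero_iff]
  constructor
  · intro hall
    by_contra hnp
    have hmf := Nat.minFac_prime (show k + 2 ≠ 1 by omega)
    have hdvd := Nat.minFac_dvd (k + 2)
    have hle : (k + 2).minFac ≤ k + 2 := Nat.le_of_dvd (by omega) hdvd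
    have hne : (k + 2).minFac ≠ k + 2 := by
      intro he
      exact hnp ((Nat.prime_def_minFac).mpr ⟨by omega, he⟩)
    exact hall (k + 2).minFac (by omega) hmf hdvd
  · intro hp p hle hpr hdvd
    rcases (Nat.Prime.eq_one_or_self_of_dvd hp p hdvd) with h | h
    · exact absurd h (by have := hpr.two_le; omega)
    · omega

-- ---- A's fold invariant ----

theorem stepA_inv (L k : Nat) (h2 : 2 ≤ k + 2) (hk : k + 2 ≤ L) :
    stepA (1 + (npr (k + 1) : Int), midA L (k + 1)) ((k : Int) + 2) =
      (1 + (npr (k + 2) : Int), midA L (k + 2)) := by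
  have hcast : ((k : Int) + 2) = ((k + 2 : Nat) : Int) := by push_cast; ring
  have hmc : k + 2 < (L - 1) + 2 := by omega
  unfold stepA
  rw [hcast, midA_shape, midGet _ _ _ hmc]
  simp only [show ¬ (k + 2 = 0) by omega, show ¬ (k + 2 = 1) by omega, if_false]
  by_cases hp : Nat.Prime (k + 2)
  · -- prime: cell is still 0, a sweep happens
    have hz : pcol (k + 1) (k + 2) = 0 := (pcol_self_zero k).mpr hp
    rw [hz]
    simp only [ne_eq, not_true_eq_false, if_false, ite_false, not_false_eq_true]
    have hcnt : 1 + (npr (k + 1) : Int) + 1 = 1 + (npr (k + 2) : Int) := by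
      rw [npr_succ (k + 1), if_pos hp]; push_cast; ring
    refine Prod.ext hcnt ?_
    apply midMapIdx
    · rw [if_neg (by rintro ⟨hle, -⟩; omega)]
    · rw [if_neg (by rintro ⟨hle, -⟩; omega)]
    · intro n h2 hnc
      have hmodiff : (PySem.Int.mod ((n : Nat) : Int) ((k + 2 : Nat) : Int) = 0) ↔ n % (k + 2) = 0 := by
        rw [PySem.Int.mod_natCast]; exact_mod_cast Iff.rfl
      by_cases hdvd : (k + 2) ∣ n
      · have hle : k + 2 ≤ n := Nat.le_of_dvd (by omega) hdvd
        have hcond : ((k + 2 : Nat) : Int) ≤ ((n : Nat) : Int) ∧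
            PySem.Int.mod ((n : Nat) : Int) ((k + 2 : Nat) : Int) = 0 := by
          exact ⟨by exact_mod_cast hle, hmodiff.mpr (Nat.dvd_iff_mod_eq_zero.mp hdvd)⟩
        rw [if_pos hcond]
        show 1 + (npr (k + 1) : Int) + 1 = pcol (k + 2) n
        rw [pcol, if_pos ⟨hp, hdvd⟩, hcnt]
      · have hcond : ¬ (((k + 2 : Nat) : Int) ≤ ((n : Nat) : Int) ∧
            PySem.Int.mod ((n : Nat) : Int) ((k + 2 : Nat) : Int) = 0) := by
          rintro ⟨-, hmz⟩
          exact hdvd (Nat.dvd_of_mod_eq_zero (hmodiff.mp hmz))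
        rw [if_neg hcond]
        show pcol (k + 1) n = pcol (k + 2) n
        conv_rhs => rw [pcol]
        rw [if_neg (by rintro ⟨_, hd⟩; exact hdvd hd)]
  · -- composite: cell nonzero, nothing changes
    have hnz : pcol (k + 1) (k + 2) ≠ 0 := by
      intro hz; exact hp ((pcol_self_zero k).mp hz)
    rw [if_pos hnz]
    have hcnt : 1 + (npr (k + 1) : Int) = 1 + (npr (k + 2) : Int) := by
      rw [npr_succ (k + 1)]; simp [hp]
    refine Prod.ext hcnt ?_
    show midA L (k + 1) = midA L (k + 2)
    unfold midA
    congr 2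
    funext n
    conv_rhs => rw [pcol]
    rw [if_neg (by rintro ⟨hpp, _⟩; exact hp hpp)]

theorem foldA_inv (L : Nat) (hL : 2 ≤ L) (k : Nat) (hk : 2 + k ≤ L + 1) :
    (PySem.List.pyRange 2 (2 + (k : Int)) 1).foldl stepA (1, midA L 1) =
      (1 + (npr (k + 1) : Int), midA L (k + 1)) := by
  induction k with
  | zero =>
    rw [show ((2 : Int) + ((0 : Nat) : Int)) = 2 by norm_num, PySem.List.pyRange_one_eq_nil le_rfl]
    simp [npr_one]
  | succ k ih =>
    have hk' : 2 + k ≤ L + 1 := by omega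
    have hsplit : (2 : Int) + ((k + 1 : Nat) : Int) = (2 + (k : Int)) + 1 := by push_cast; ring
    rw [hsplit, PySem.List.pyRange_one_succ_right (by omega), List.foldl_append, ih hk']
    simp only [List.foldl_cons, List.foldl_nil]
    have harg : (2 : Int) + (k : Int) = (k : Int) + 2 := by ring
    rw [harg]
    exact stepA_inv L k (by omega) (by omega)

theorem pcol_one (n : Nat) : pcol 1 n = 0 := by
  rw [pcol, if_neg (by rintro ⟨hp, -⟩; exact Nat.not_prime_one hp)]
  rfl

theorem npr_small (k : Nat) (h : k ≤ 1) : npr k = 0 := by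
  interval_cases k <;> decide

theorem specOut_small (limit : Int) (h : limit < 2) : specOut limit = (1, [0, 1]) := by
  unfold specOut
  have h1 : limit.toNat ≤ 1 := by omega
  rw [npr_small _ h1, show limit.toNat - 1 = 0 by omega]
  simp

theorem A_eq_spec (limit : Int) : color_number limit = specOut limit := by
  by_cases hlt : limit < 2
  · unfold color_number
    rw [PySem.List.pyRange_one_eq_nil (by omega), specOut_small limit hlt]
    simp
  · push_neg at hlt
    set L := limit.toNat with hLdef
    have hL : 2 ≤ L := by omega
    have hlim : limit = (L : Int) := by omega
    unfold color_number
    have hinit : ([0, 1] ++ (PySem.List.pyRange 2 (limit + 1) 1).map (fun _ => (0 : Int)))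
        = midA L 1 := by
      rw [midA_shape]
      have h1 : (PySem.List.pyRange 2 (limit + 1) 1).map (fun _ => (0 : Int))
          = List.replicate (L - 1) 0 := by
        rw [List.map_const', PySem.List.length_pyRange_one]
        congr 1
        omega
      have h2 : (List.range' 2 (L - 1)).map (fun n => pcol 1 n)
          = List.replicate (L - 1) 0 := by
        rw [show (fun n => pcol 1 n) = (fun _ : Nat => (0 : Int)) from funext pcol_one,
          List.map_const', List.length_range']
      rw [h1, h2]
      rfl
    rw [hinit]
    have hsplit : limit + 1 = 2 + ((L - 1 : Nat) : Int) := by omega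
    rw [hsplit, foldA_inv L hL (L - 1) (by omega)]
    unfold specOut
    rw [show L - 1 + 1 = L by omega, ← hLdef]
    refine Prod.ext rfl ?_
    show (0 : Int) :: (1 : Int) :: (List.range' 2 (L - 1)).map (fun n => pcol L n)
        = (0 : Int) :: (1 : Int) :: (List.range' 2 (L - 1)).map (fun n => 1 + (npr (lpf n) : Int))
    congr 1
    congr 1
    apply List.map_congr_left
    intro n hn
    rw [List.mem_range'] at hn
    obtain ⟨i, hi, hni⟩ := hn
    have h2n : 2 ≤ n := by omega
    have hnL : n ≤ L := by omega
    exact pcol_final L n h2n ((lpf_le n h2n).trans hnL)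

-- ---- B's fold invariant ----

theorem spfB_eq (n : Nat) (h2 : 2 ≤ n) : spfB ((n : Nat) : Int) = (n.minFac : Int) := by
  have h := sdLoop_correct n h2 2 le_rfl (fun e he helt => by omega)
  simpa [spfB] using h

theorem stepB_inv (L k : Nat) (hk : k + 2 ≤ L) :
    stepB (1 + (npr (k + 1) : Int), midB L (k + 1)) ((k : Int) + 2) =
      (1 + (npr (k + 2) : Int), midB L (k + 2)) := by
  have hcast : ((k : Int) + 2) = ((k + 2 : Nat) : Int) := by push_cast; ring
  have h2m : 2 ≤ k + 2 := by omega
  have hmc : k + 2 < (L - 1) + 2 := by omega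
  unfold stepB
  rw [hcast, spfB_eq (k + 2) h2m]
  by_cases hp : Nat.Prime (k + 2)
  · -- prime: minFac = self, open a new color
    have hmfe : (k + 2).minFac = k + 2 := hp.minFac_eq
    rw [if_pos (by exact_mod_cast hmfe)]
    have hcnt : 1 + (npr (k + 1) : Int) + 1 = 1 + (npr (k + 2) : Int) := by
      rw [npr_succ (k + 1), if_pos hp]; push_cast; ring
    refine Prod.ext hcnt ?_
    show PySem.List.pySetD (midB L (k + 1)) _ _ = midB L (k + 2)
    rw [midB_shape, midB_shape, PySem.List.pySetD_natCast]
    apply midSet _ _ _ _ _ h2m hmc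
    · rw [if_pos le_rfl, lpf_eq_self (k + 2) hp, ← hcnt]
    · intro n h2n hnc hne
      by_cases hle : n ≤ k + 1
      · rw [if_pos hle, if_pos (by omega)]
      · rw [if_neg hle, if_neg (by omega)]
  · -- composite: reuse the color of n // d
    have hmfne : (k + 2).minFac ≠ k + 2 := by
      intro he
      exact hp ((Nat.prime_def_minFac).mpr ⟨by omega, he⟩)
    rw [if_neg (by exact_mod_cast hmfne)]
    have hq2 : 2 ≤ (k + 2) / (k + 2).minFac := minFac_div_lbound (k + 2) h2m hp
    have hqlt : (k + 2) / (k + 2).minFac < k + 2 :=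
      Nat.div_lt_self (by omega) (Nat.minFac_prime (by omega)).one_lt
    have hcnt : 1 + (npr (k + 1) : Int) = 1 + (npr (k + 2) : Int) := by
      rw [npr_succ (k + 1)]; simp [hp]
    refine Prod.ext hcnt ?_
    show PySem.List.pySetD (midB L (k + 1)) _
        (PySem.List.pyGetD (midB L (k + 1)) (PySem.Int.floordiv _ _) 0) = midB L (k + 2)
    rw [midB_shape, midB_shape, PySem.Int.floordiv_natCast, midGet _ _ _ (by omega),
      PySem.List.pySetD_natCast]
    rw [if_neg (by omega), if_neg (by omega), if_pos (by omega : (k + 2) / (k + 2).minFac ≤ k + 1)]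
    apply midSet _ _ _ _ _ h2m hmc
    · rw [if_pos le_rfl, lpf_comp (k + 2) h2m hp]
    · intro n h2n hnc hne
      by_cases hle : n ≤ k + 1
      · rw [if_pos hle, if_pos (by omega)]
      · rw [if_neg hle, if_neg (by omega)]

theorem foldB_inv (L : Nat) (hL : 2 ≤ L) (k : Nat) (hk : 2 + k ≤ L + 1) :
    (PySem.List.pyRange 2 (2 + (k : Int)) 1).foldl stepB (1, midB L 1) =
      (1 + (npr (k + 1) : Int), midB L (k + 1)) := by
  induction k with
  | zero =>
    rw [show ((2 : Int) + ((0 : Nat) : Int)) = 2 by norm_num, PySem.List.pyRange_one_eq_nil le_rfl]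
    simp [npr_one]
  | succ k ih =>
    have hk' : 2 + k ≤ L + 1 := by omega
    have hsplit : (2 : Int) + ((k + 1 : Nat) : Int) = (2 + (k : Int)) + 1 := by push_cast; ring
    rw [hsplit, PySem.List.pyRange_one_succ_right (by omega), List.foldl_append, ih hk']
    simp only [List.foldl_cons, List.foldl_nil]
    have harg : (2 : Int) + (k : Int) = (k : Int) + 2 := by ring
    rw [harg]
    exact stepB_inv L k (by omega)

theorem B_eq_spec (limit : Int) : color_number_alt limit = specOut limit := by
  by_cases hlt : limit < 2
  · unfold color_number_alt
    rw [PySem.List.pyRange_one_eq_nil (by omega), specOut_small limit hlt,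
      show (max (limit - 1) 0).toNat = 0 by omega]
    simp
  · push_neg at hlt
    set L := limit.toNat with hLdef
    have hL : 2 ≤ L := by omega
    unfold color_number_alt
    have hinit : ([0, 1] ++ List.replicate (max (limit - 1) 0).toNat (0 : Int)) = midB L 1 := by
      rw [midB_shape]
      have h2 : (List.range' 2 (L - 1)).map
          (fun n => if n ≤ 1 then 1 + (npr (lpf n) : Int) else 0) = List.replicate (L - 1) 0 := by
        rw [List.map_congr_left (g := fun _ : Nat => (0 : Int)) ?_, List.map_const',
          List.length_range']
        intro n hn
        rw [List.mem_range'] at hn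
        obtain ⟨i, hi, hni⟩ := hn
        rw [if_neg (by omega)]
      rw [h2, show (max (limit - 1) 0).toNat = L - 1 by omega]
      rfl
    rw [hinit]
    have hsplit : limit + 1 = 2 + ((L - 1 : Nat) : Int) := by omega
    rw [hsplit, foldB_inv L hL (L - 1) (by omega)]
    unfold specOut
    rw [show L - 1 + 1 = L by omega, ← hLdef]
    refine Prod.ext rfl ?_
    show (0 : Int) :: (1 : Int) :: (List.range' 2 (L - 1)).map
          (fun n => if n ≤ L then 1 + (npr (lpf n) : Int) else 0)
        = (0 : Int) :: (1 : Int) :: (List.range' 2 (L - 1)).map (fun n => 1 + (npr (lpf n) : Int))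
    congr 1
    congr 1
    apply List.map_congr_left
    intro n hn
    rw [List.mem_range'] at hn
    obtain ⟨i, hi, hni⟩ := hn
    rw [if_pos (by omega)]

-- ===== VERDICT (by name: the statement is the Claim_ definition above) =====
theorem color_number_spec : Claim_equal_color_number := by
  intro limit _
  unfold Spec_color_number
  rw [A_eq_spec, B_eq_spec]
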